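-- pv_equiv track=rewrite | github.com/thehackerwithin/berkeley | extendingPython_CAPI-cython/python_version.py | find_potential_event_ptrs
-- ===== SOURCE A (Python) =====
-- def find_potential_event_ptrs(timestamps, coinc_win, min_ev_size, max_ev_size):
--     '''Take sorted timestamps and return ptrs and lens to locations in the
--        timestamp list that correspond to potential gamma ray events that have
--        the following properties:
--          - They all occur within coinc_win samples of each other
--          - There are at least min_ev_size readouts
--          - There are no more than max_ev_size readouts'''
--     ptrs = []
--     lens = []
--     i = 0
--     ary_len = len(timestamps)
--     while i < ary_len:
--         n = 1
--         while (i+n < ary_len) and \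
--               (timestamps[i+n] <= timestamps[i] + coinc_win):
--             n += 1
--         if n >= min_ev_size and n <= max_ev_size:
--             ptrs.append(i)
--             lens.append(n)
--         i += n
--     return ptrs, lens
-- ===== SOURCE B (Python) =====
-- def find_potential_event_ptrs(timestamps, coinc_win, min_ev_size, max_ev_size):
--     '''Single forward pass: carry the open cluster (start index, anchor value);
--        close it when an element falls outside the window, emit it if its size
--        is within [min_ev_size, max_ev_size].'''
--     ptrs = []
--     lens = []
--     open_cluster = None            # (start index, anchor timestamp) or None
--     for j, t in enumerate(timestamps):
--         if open_cluster is None: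
--             open_cluster = (j, t)
--         else:
--             start, anchor = open_cluster
--             if t > anchor + coinc_win:
--                 n = j - start
--                 if min_ev_size <= n <= max_ev_size:
--                     ptrs.append(start)
--                     lens.append(n)
--                 open_cluster = (j, t)
--     if open_cluster is not None:
--         start, _ = open_cluster
--         n = len(timestamps) - start
--         if min_ev_size <= n <= max_ev_size:
--             ptrs.append(start)
--             lens.append(n)
--     return ptrs, lens
-- ===== Notes on version B (the rewrite author's own statement) =====
-- stated objective: alternative
-- what changed: Replaced the nested index-based while-loops (outer pointer jump plus inner linear count) with a single forward fold over enumerate(timestamps) that carries the open cluster (start index, anchor value) and closes/emits it when an element leaves the window.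
import Mathlib
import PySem

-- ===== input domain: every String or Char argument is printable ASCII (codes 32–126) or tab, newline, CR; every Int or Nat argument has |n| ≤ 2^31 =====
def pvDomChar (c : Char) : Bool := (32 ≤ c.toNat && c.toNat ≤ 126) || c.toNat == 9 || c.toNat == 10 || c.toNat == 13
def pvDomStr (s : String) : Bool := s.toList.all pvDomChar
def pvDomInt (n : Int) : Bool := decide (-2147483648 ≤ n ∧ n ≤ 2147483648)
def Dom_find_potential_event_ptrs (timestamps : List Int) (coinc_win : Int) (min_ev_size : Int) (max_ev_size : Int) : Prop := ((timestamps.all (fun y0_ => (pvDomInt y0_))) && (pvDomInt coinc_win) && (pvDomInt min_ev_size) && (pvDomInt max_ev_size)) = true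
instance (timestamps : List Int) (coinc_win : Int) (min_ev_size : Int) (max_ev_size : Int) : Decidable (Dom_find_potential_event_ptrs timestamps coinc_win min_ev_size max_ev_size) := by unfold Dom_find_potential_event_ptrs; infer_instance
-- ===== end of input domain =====

-- B replaces A's nested while-loops by one forward fold carrying the open cluster (alternative decomposition, same O(n) cost).

-- ===== PORT A =====
-- inner loop: while (i+n < ary_len) and (timestamps[i+n] <= timestamps[i] + coinc_win): n += 1
-- (indices are in range whenever read, so getD is exact there)
def fpeInner (ts : List Int) (bound : Int) (i n : Nat) : Nat :=
  if i + n < ts.length ∧ ts.getD (i + n) 0 ≤ bound then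
    fpeInner ts bound i (n + 1)
  else n
termination_by ts.length - (i + n)

theorem fpeInner_ge (ts : List Int) (bound : Int) (i n : Nat) : n ≤ fpeInner ts bound i n := by
  fun_induction fpeInner <;> omega

-- outer loop: while i < ary_len: …; i += n
def fpeOuter (ts : List Int) (w mn mx : Int) (i : Nat) (ptrs lens : List Int) : List Int × List Int :=
  if h : i < ts.length then
    let n := fpeInner ts (ts.getD i 0 + w) i 1
    if mn ≤ (n : Int) ∧ (n : Int) ≤ mx then
      fpeOuter ts w mn mx (i + n) (ptrs ++ [(i : Int)]) (lens ++ [(n : Int)])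
    else
      fpeOuter ts w mn mx (i + n) ptrs lens
  else (ptrs, lens)
termination_by ts.length - i
decreasing_by
  · have := fpeInner_ge ts (ts.getD i 0 + w) i 1; omega
  · have := fpeInner_ge ts (ts.getD i 0 + w) i 1; omega

def find_potential_event_ptrs (timestamps : List Int) (coinc_win : Int) (min_ev_size : Int) (max_ev_size : Int) : List Int × List Int :=
  fpeOuter timestamps coinc_win min_ev_size max_ev_size 0 [] []

-- ===== PORT B =====
-- the loop body of Source B: state = (ptrs, lens, open_cluster)
def fpeStep (w mn mx : Int) (st : List Int × List Int × Option (Int × Int)) (jt : Int × Int) :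
    List Int × List Int × Option (Int × Int) :=
  match st.2.2 with
  | none => (st.1, st.2.1, some (jt.1, jt.2))
  | some (start, anchor) =>
      if jt.2 > anchor + w then
        let n := jt.1 - start
        if mn ≤ n ∧ n ≤ mx then
          (st.1 ++ [start], st.2.1 ++ [n], some (jt.1, jt.2))
        else (st.1, st.2.1, some (jt.1, jt.2))
      else st

-- the post-loop close of Source B
def fpeClose (len mn mx : Int) (st : List Int × List Int × Option (Int × Int)) : List Int × List Int :=
  match st.2.2 with
  | none => (st.1, st.2.1)
  | some (start, _) =>
      let n := len - start
      if mn ≤ n ∧ n ≤ mx then (st.1 ++ [start], st.2.1 ++ [n]) else (st.1, st.2.1)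

def find_potential_event_ptrs_alt (timestamps : List Int) (coinc_win : Int) (min_ev_size : Int) (max_ev_size : Int) : List Int × List Int :=
  fpeClose (timestamps.length : Int) min_ev_size max_ev_size
    ((PySem.List.enumerate timestamps).foldl (fpeStep coinc_win min_ev_size max_ev_size) ([], [], none))

-- ===== PRECONDITION & SPEC =====
def Spec_find_potential_event_ptrs (timestamps : List Int) (coinc_win : Int) (min_ev_size : Int) (max_ev_size : Int) (out : List Int × List Int) : Prop := out = find_potential_event_ptrs_alt timestamps coinc_win min_ev_size max_ev_size
instance (timestamps : List Int) (coinc_win : Int) (min_ev_size : Int) (max_ev_size : Int) (out : List Int × List Int) : Decidable (Spec_find_potential_event_ptrs timestamps coinc_win min_ev_size max_ev_size out) := by unfold Spec_find_potential_event_ptrs; infer_instance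

-- ===== CLAIM (what is proved, stated in full; the proofs are below) =====
def Claim_equal_find_potential_event_ptrs : Prop := ∀ (timestamps : List Int) (coinc_win : Int) (min_ev_size : Int) (max_ev_size : Int), Dom_find_potential_event_ptrs timestamps coinc_win min_ev_size max_ev_size → Spec_find_potential_event_ptrs timestamps coinc_win min_ev_size max_ev_size (find_potential_event_ptrs timestamps coinc_win min_ev_size max_ev_size)

-- ===== LEMMAS AND PROOFS =====

-- "run B's fold from position k with a fresh (none) cluster, then close"
def fpeRun (ts : List Int) (w mn mx : Int) (k : Nat) (ptrs lens : List Int) : List Int × List Int :=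
  fpeClose (ts.length : Int) mn mx
    ((PySem.List.enumerate (ts.drop k) (k : Int)).foldl (fpeStep w mn mx) (ptrs, lens, none))

theorem drop_decomp (ts : List Int) (k : Nat) (h : k < ts.length) :
    ts.drop k = ts.getD k 0 :: ts.drop (k + 1) := by
  have h2 : ts.drop k = ts[k] :: ts.drop (k + 1) := List.drop_eq_getElem_cons h
  rw [h2, List.getD, List.getElem?_eq_getElem h]; rfl

theorem fpeRun_ge_len (ts : List Int) (w mn mx : Int) (k : Nat) (ptrs lens : List Int)
    (h : ts.length ≤ k) : fpeRun ts w mn mx k ptrs lens = (ptrs, lens) := by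
  simp [fpeRun, List.drop_eq_nil_of_le h, fpeClose]

-- absorb: starting from an open cluster (i, ts[i]) at position i+n, the fold absorbs
-- exactly the fpeInner count and then behaves like a fresh run after the cluster
theorem fpe_absorb (ts : List Int) (w mn mx : Int) (i : Nat) (hi : i < ts.length)
    (n : Nat) (hn : 1 ≤ n) (hle : i + n ≤ ts.length) (ptrs lens : List Int) :
    fpeClose (ts.length : Int) mn mx
      ((PySem.List.enumerate (ts.drop (i + n)) ((i + n : Nat) : Int)).foldl
        (fpeStep w mn mx) (ptrs, lens, some ((i : Int), ts.getD i 0))) =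
    (let N := fpeInner ts (ts.getD i 0 + w) i n
     if mn ≤ (N : Int) ∧ (N : Int) ≤ mx then
       fpeRun ts w mn mx (i + N) (ptrs ++ [(i : Int)]) (lens ++ [(N : Int)])
     else fpeRun ts w mn mx (i + N) ptrs lens) := by
  by_cases h : i + n < ts.length ∧ ts.getD (i + n) 0 ≤ ts.getD i 0 + w
  · -- inner loop continues: the fold step leaves the state unchanged
    rw [drop_decomp ts (i + n) h.1, PySem.List.enumerate_cons]
    rw [List.foldl_cons]
    have hstep : fpeStep w mn mx ((ptrs, lens, some ((i : Int), ts.getD i 0)))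
        (((i + n : Nat) : Int), ts.getD (i + n) 0) = (ptrs, lens, some ((i : Int), ts.getD i 0)) := by
      simp only [fpeStep]
      rw [if_neg (by omega)]
    rw [hstep]
    have hc1 : ((i + n : Nat) : Int) + 1 = ((i + (n + 1) : Nat) : Int) := by push_cast; ring
    have hc2 : i + n + 1 = i + (n + 1) := by omega
    rw [hc1, hc2, fpe_absorb ts w mn mx i hi (n + 1) (by omega) (by omega) ptrs lens]
    have hN : fpeInner ts (ts.getD i 0 + w) i n = fpeInner ts (ts.getD i 0 + w) i (n + 1) := by
      rw [fpeInner, if_pos h]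
    rw [hN]
  · -- inner loop stops here: N = n
    have hN : fpeInner ts (ts.getD i 0 + w) i n = n := by
      rw [fpeInner, if_neg h]
    rw [hN]
    by_cases hlen : i + n < ts.length
    · -- stopped by the value test: the next element closes the cluster
      have hval : ts.getD (i + n) 0 > ts.getD i 0 + w := by
        by_contra hc; exact h ⟨hlen, by omega⟩
      rw [drop_decomp ts (i + n) hlen, PySem.List.enumerate_cons, List.foldl_cons]
      have hnInt : ((i + n : Nat) : Int) - (i : Int) = (n : Int) := by push_cast; ring
      simp only [fpeStep]
      rw [if_pos hval]
      simp only [hnInt]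
      have hrhs : ∀ p l : List Int, fpeRun ts w mn mx (i + n) p l =
          fpeClose (ts.length : Int) mn mx
            ((PySem.List.enumerate (ts.drop (i + n + 1)) (((i + n : Nat) : Int) + 1)).foldl
              (fpeStep w mn mx) (p, l, some (((i + n : Nat) : Int), ts.getD (i + n) 0))) := by
        intro p l
        rw [fpeRun, drop_decomp ts (i + n) hlen, PySem.List.enumerate_cons, List.foldl_cons]
        rfl
      by_cases hcond : mn ≤ (n : Int) ∧ (n : Int) ≤ mx
      · rw [if_pos hcond, if_pos hcond, hrhs]
      · rw [if_neg hcond, if_neg hcond, hrhs]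
    · -- stopped by end of list: the final close emits n = len - i
      have hd : ts.drop (i + n) = [] := List.drop_eq_nil_of_le (by omega)
      have hcl : ((ts.length : Int) - (i : Int)) = (n : Int) := by omega
      simp only [hd, PySem.List.enumerate, List.foldl_nil, fpeClose, hcl]
      by_cases hcond : mn ≤ (n : Int) ∧ (n : Int) ≤ mx
      · rw [if_pos hcond, if_pos hcond, fpeRun_ge_len ts w mn mx (i + n) _ _ (by omega)]
      · rw [if_neg hcond, if_neg hcond, fpeRun_ge_len ts w mn mx (i + n) _ _ (by omega)]
termination_by ts.length - (i + n)

theorem fpeRun_eq_outer (ts : List Int) (w mn mx : Int) (i : Nat) (ptrs lens : List Int) :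
    fpeRun ts w mn mx i ptrs lens = fpeOuter ts w mn mx i ptrs lens := by
  by_cases hi : i < ts.length
  · rw [fpeRun, drop_decomp ts i hi, PySem.List.enumerate_cons]
    simp only [List.foldl_cons, fpeStep]
    have h1 : (i : Int) + 1 = ((i + 1 : Nat) : Int) := by push_cast; ring
    rw [h1]
    have habs := fpe_absorb ts w mn mx i hi 1 (le_refl 1) (by omega) ptrs lens
    rw [habs]
    have hge := fpeInner_ge ts (ts.getD i 0 + w) i 1
    rw [fpeOuter]
    simp only [dif_pos hi]
    by_cases hcond : mn ≤ ((fpeInner ts (ts.getD i 0 + w) i 1 : Nat) : Int) ∧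
        ((fpeInner ts (ts.getD i 0 + w) i 1 : Nat) : Int) ≤ mx
    · simp only [if_pos hcond]
      exact fpeRun_eq_outer ts w mn mx (i + fpeInner ts (ts.getD i 0 + w) i 1) _ _
    · simp only [if_neg hcond]
      exact fpeRun_eq_outer ts w mn mx (i + fpeInner ts (ts.getD i 0 + w) i 1) _ _
  · rw [fpeRun_ge_len ts w mn mx i ptrs lens (by omega), fpeOuter]
    simp [hi]
termination_by ts.length - i
decreasing_by
  all_goals have := fpeInner_ge ts (ts.getD i 0 + w) i 1; omega

-- ===== VERDICT (by name: the statement is the Claim_ definition above) =====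
theorem find_potential_event_ptrs_spec : Claim_equal_find_potential_event_ptrs := by
  intro ts w mn mx _
  unfold Spec_find_potential_event_ptrs find_potential_event_ptrs find_potential_event_ptrs_alt
  rw [← fpeRun_eq_outer]
  simp [fpeRun]
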